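-- pv_equiv track=rewrite | github.com/Igor743646/CodeWars | Ce*s*r*d Strings (7kyu Python).py | uncensor1
-- ===== SOURCE A (Python) =====
-- def uncensor1(infected, discovered):
--     result = ""
--     j = 0
--     for i in infected:
--         if i == '*':
--             result += discovered[j]
--             j+=1
--         else:
--             result += i
--     return result
-- ===== SOURCE B (Python) =====
-- def uncensor1(infected, discovered):
--     parts = infected.split('*')
--     res = parts[0]
--     for k in range(1, len(parts)):
--         res += discovered[k - 1] + parts[k]
--     return res
-- ===== Notes on version B (the rewrite author's own statement) =====
-- stated objective: faster
-- what changed: Replaces the character-by-character scan with an index counter by tokenizing on '*' via str.split and concatenating whole segments interleaved with the discovered characters by index (far fewer string operations); on too-short discovered the indexing discovered[k-1] still raises IndexError like A.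
import Mathlib
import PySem

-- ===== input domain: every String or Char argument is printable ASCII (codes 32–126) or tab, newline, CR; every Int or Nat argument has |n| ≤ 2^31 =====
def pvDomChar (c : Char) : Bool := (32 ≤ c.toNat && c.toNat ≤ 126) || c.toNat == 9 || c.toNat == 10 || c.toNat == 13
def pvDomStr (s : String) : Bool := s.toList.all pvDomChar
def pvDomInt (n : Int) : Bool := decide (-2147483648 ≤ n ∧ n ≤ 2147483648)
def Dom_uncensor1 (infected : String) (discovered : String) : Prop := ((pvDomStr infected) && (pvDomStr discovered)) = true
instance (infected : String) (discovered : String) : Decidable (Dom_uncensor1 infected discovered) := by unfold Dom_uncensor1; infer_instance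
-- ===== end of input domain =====

-- ===== PORT A =====
-- B rebuilds the string from the '*'-split segments instead of A's char-by-char scan (return value only; neither mutates).
def uncensor1 (infected : String) (discovered : String) : String :=
  -- result = ""; j = 0; for i in infected: if i == '*': result += discovered[j]; j += 1 else: result += i
  -- discovered[j] is ported as pyGetD under Pre_uncensor1 (j stays in range there; Python raises IndexError outside).
  let st := infected.toList.foldl
    (fun (st : List Char × Int) i =>
      if i = '*' then (st.1 ++ [PySem.List.pyGetD discovered.toList st.2 ' '], st.2 + 1)
      else (st.1 ++ [i], st.2)) ([], 0)
  String.ofList st.1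

-- ===== PORT B =====
def uncensor1_alt (infected : String) (discovered : String) : String :=
  -- parts = infected.split('*'); res = parts[0]
  -- for k in range(1, len(parts)): res += discovered[k-1] + parts[k]
  -- discovered[k-1] and parts[k] ported as pyGetD: both in range under Pre_uncensor1 (k < len(parts)).
  let parts := infected.toList.splitOn '*'
  let res := (PySem.List.pyRange 1 (parts.length : Int) 1).foldl
    (fun acc k => acc ++ PySem.List.pyGetD discovered.toList (k - 1) ' ' :: PySem.List.pyGetD parts k [])
    parts.headI
  String.ofList res

-- ===== PRECONDITION & SPEC =====
-- Pre_ excludes exactly the inputs where both A and B raise IndexError: more '*' in infected than characters in discovered.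
def Pre_uncensor1 (infected : String) (discovered : String) : Prop :=
  infected.toList.count '*' ≤ discovered.toList.length
instance (infected : String) (discovered : String) : Decidable (Pre_uncensor1 infected discovered) := by unfold Pre_uncensor1; infer_instance
def pvWitness_uncensor1 : String × String := ("du*k t*pe", "ci")

def Spec_uncensor1 (infected : String) (discovered : String) (out : String) : Prop := out = uncensor1_alt infected discovered
instance (infected : String) (discovered : String) (out : String) : Decidable (Spec_uncensor1 infected discovered out) := by unfold Spec_uncensor1; infer_instance

-- ===== CLAIM (what is proved, stated in full; the proofs are below) =====
def Claim_equal_uncensor1 : Prop := ∀ (infected : String) (discovered : String), Dom_uncensor1 infected discovered → Pre_uncensor1 infected discovered → Spec_uncensor1 infected discovered (uncensor1 infected discovered)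

-- ===== LEMMAS AND PROOFS =====

-- A's loop body, with the accumulator peeled off and the index as a Nat.
def uncBody (full : List Char) : List Char → Nat → List Char
  | [], _ => []
  | c :: cs, j => if c = '*' then full.getD j ' ' :: uncBody full cs (j + 1) else c :: uncBody full cs j

theorem uncensor1_foldl_eq_uncBody (full : List Char) (cs : List Char) (acc : List Char) (j : Nat) :
    (cs.foldl
      (fun (st : List Char × Int) i =>
        if i = '*' then (st.1 ++ [PySem.List.pyGetD full st.2 ' '], st.2 + 1)
        else (st.1 ++ [i], st.2)) (acc, (j : Int))).1 = acc ++ uncBody full cs j := by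
  induction cs generalizing acc j with
  | nil => simp [uncBody]
  | cons c cs ih =>
    by_cases hc : c = '*'
    · have hj : ((j : Int) + 1) = ((j + 1 : Nat) : Int) := by push_cast; ring
      simp only [List.foldl_cons, hc, if_true, hj, uncBody]
      rw [ih, PySem.List.pyGetD_natCast]
      simp
    · simp only [List.foldl_cons, uncBody, if_neg hc]
      rw [ih]
      simp

theorem uncBody_eq_interleave (full : List Char) (cs : List Char) (j : Nat)
    (h : cs.count '*' + j ≤ full.length) :
    uncBody full cs j =
      (cs.splitOnP (· == '*')).headI ++
        (((full.drop j).zip (cs.splitOnP (· == '*')).tail).map (fun p => p.1 :: p.2)).flatten := by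
  induction cs generalizing j with
  | nil => simp [uncBody, List.splitOnP_nil]
  | cons c cs ih =>
    obtain ⟨hd, tl, hsp⟩ := List.exists_cons_of_ne_nil (List.splitOnP_ne_nil (· == '*') cs)
    by_cases hc : c = '*'
    · have hcount : cs.count '*' + (j + 1) ≤ full.length := by
        subst hc; simp [List.count_cons] at h; omega
      have hj : j < full.length := by
        simp [List.count_cons, hc] at h; omega
      have hdrop : full.drop j = full[j] :: full.drop (j + 1) := (List.getElem_cons_drop hj).symm
      have hget : full.getD j ' ' = full[j] := List.getD_eq_getElem full ' ' hj
      subst hc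
      rw [show uncBody full ('*' :: cs) j = full.getD j ' ' :: uncBody full cs (j + 1) from by
            simp [uncBody]]
      rw [ih _ hcount, hget, hdrop]
      rw [show ('*' :: cs).splitOnP (· == '*') = [] :: cs.splitOnP (· == '*') from by simp]
      rw [hsp]
      simp only [List.headI, List.tail_cons, List.zip_cons_cons, List.map_cons,
        List.flatten_cons, List.nil_append]
      simp
    · have hcount : cs.count '*' + j ≤ full.length := by
        simp [List.count_cons, hc] at h ⊢; omega
      rw [show uncBody full (c :: cs) j = c :: uncBody full cs j from by simp [uncBody, hc]]
      rw [ih _ hcount]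
      rw [show (c :: cs).splitOnP (· == '*') = (cs.splitOnP (· == '*')).modifyHead (c :: ·) from by
            simp [hc]]
      rw [hsp]
      simp

theorem length_splitOnP_count (cs : List Char) :
    (cs.splitOnP (· == '*')).length = cs.count '*' + 1 := by
  induction cs with
  | nil => simp [List.splitOnP_nil]
  | cons c cs ih =>
    rw [List.splitOnP_cons]
    by_cases hc : c = '*'
    · simp [hc, List.count_cons, ih]
    · have hne := List.splitOnP_ne_nil (· == '*') cs
      simp [hc, List.count_cons, List.length_modifyHead, ih]

-- B's indexing loop over range(1, len(parts)) produces the interleave of discovered with parts.tail.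
theorem alt_loop_eq_interleave (full : List Char) (parts : List (List Char))
    (hlen : parts.length - 1 ≤ full.length) (m : Nat) (hm : m ≤ parts.length - 1)
    (acc : List Char) :
    (List.range m).foldl
      (fun (acc : List Char) (k : Nat) =>
        acc ++ PySem.List.pyGetD full (1 + (k : Int) - 1) ' '
            :: PySem.List.pyGetD parts (1 + (k : Int)) []) acc
      = acc ++ (((full.zip parts.tail).take m).map (fun p => p.1 :: p.2)).flatten := by
  induction m generalizing acc with
  | zero => simp
  | succ m ih =>
    have hm' : m ≤ parts.length - 1 := by omega
    rw [List.range_succ, List.foldl_append, ih hm']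
    have hfull : m < full.length := by omega
    have hparts : 1 + m < parts.length := by omega
    have h1 : PySem.List.pyGetD full (1 + (m : Int) - 1) ' ' = full[m] := by
      rw [show ((1 : Int) + (m : Int) - 1) = ((m : Nat) : Int) from by push_cast; ring,
        PySem.List.pyGetD_natCast]
      exact List.getD_eq_getElem full ' ' hfull
    have h2 : PySem.List.pyGetD parts (1 + (m : Int)) [] = parts.tail[m]'(by
        simp [List.length_tail]; omega) := by
      rw [show ((1 : Int) + (m : Int)) = ((1 + m : Nat) : Int) from by push_cast; ring,
        PySem.List.pyGetD_natCast, List.getD_eq_getElem parts [] hparts]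
      rw [List.getElem_tail]
      congr 1
      omega
    have hzip : m < (full.zip parts.tail).length := by
      simp [List.length_zip, List.length_tail]; omega
    rw [List.foldl_cons, List.foldl_nil, h1, h2]
    rw [List.take_succ, List.getElem?_eq_getElem hzip]
    simp [List.getElem_zip]

-- ===== VERDICT (by name: the statement is the Claim_ definition above) =====
theorem uncensor1_spec : Claim_equal_uncensor1 := by
  intro infected discovered _ hpre
  unfold Spec_uncensor1 uncensor1 uncensor1_alt
  have h0 : ((0 : Int)) = ((0 : Nat) : Int) := rfl
  simp only [h0]
  rw [uncensor1_foldl_eq_uncBody discovered.toList infected.toList [] 0]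
  rw [uncBody_eq_interleave discovered.toList infected.toList 0 (by simpa using hpre)]
  -- the B side
  set parts := infected.toList.splitOn '*' with hparts
  have hne : parts ≠ [] := by
    simp [hparts, List.splitOn]
    exact List.splitOnP_ne_nil _ _
  have hcount : infected.toList.count '*' = parts.length - 1 := by
    simp only [hparts, List.splitOn]
    rw [length_splitOnP_count]
    omega
  have hlen : parts.length - 1 ≤ discovered.toList.length := by
    unfold Pre_uncensor1 at hpre; omega
  rw [PySem.List.pyRange_one, List.foldl_map]
  have hm : ((parts.length : Int) - 1).toNat = parts.length - 1 := by
    have := List.length_pos_iff.mpr hne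
    omega
  rw [hm, alt_loop_eq_interleave discovered.toList parts hlen (parts.length - 1) le_rfl]
  have htake : (discovered.toList.zip parts.tail).take (parts.length - 1)
      = discovered.toList.zip parts.tail := by
    apply List.take_of_length_le
    simp only [List.length_zip, List.length_tail]
    omega
  rw [htake]
  simp [hparts, List.splitOn]
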